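-- pv_equiv track=rewrite | github.com/keram88/cs_6340 | hw2/gramify.py | to_bigrams
-- ===== SOURCE A (Python) =====
-- PUNC = ('.', '?', '!')
--
-- def to_bigrams(s):
--   last = None
--   s = s.strip().split()
--   i = 0
--   while i < len(s):
--     u = s[i].lower()
--     yield (last, u)
--     if u in PUNC:
--       last = None
--     else:
--       last = u
--     i += 1
-- ===== SOURCE B (Python) =====
-- PUNC = ('.', '?', '!')
--
-- def to_bigrams(s):
--   toks = [t.lower() for t in s.strip().split()]
--   # stage 1: segment the token stream into sentences, cutting after each punctuation token
--   sents = []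
--   sent = []
--   for t in toks:
--     sent.append(t)
--     if t in PUNC:
--       sents.append(sent)
--       sent = []
--   if sent:
--     sents.append(sent)
--   # stage 2: within each sentence, the first token has no predecessor; the rest pair adjacently
--   for sent in sents:
--     yield (None, sent[0])
--     for a, b in zip(sent, sent[1:]):
--       yield (a, b)
-- ===== Notes on version B (the rewrite author's own statement) =====
-- stated objective: alternative
-- what changed: Replaced the single stateful pass threading a last-token accumulator with a two-stage segmentation algorithm: first split the lowered token stream into sentence segments (cutting after each punctuation token), then emit (None, first) plus the adjacent pairs inside each segment, so the reset rule disappears into the segment boundaries.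
import Mathlib
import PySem

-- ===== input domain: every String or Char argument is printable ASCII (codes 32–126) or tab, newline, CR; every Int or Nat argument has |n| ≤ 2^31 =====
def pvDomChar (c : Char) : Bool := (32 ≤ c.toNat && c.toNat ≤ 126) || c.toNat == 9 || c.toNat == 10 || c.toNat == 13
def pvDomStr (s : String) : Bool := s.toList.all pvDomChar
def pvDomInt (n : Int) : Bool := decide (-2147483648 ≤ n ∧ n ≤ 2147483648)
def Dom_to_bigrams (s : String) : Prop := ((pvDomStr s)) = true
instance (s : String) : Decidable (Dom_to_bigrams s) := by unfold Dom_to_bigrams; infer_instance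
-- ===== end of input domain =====

-- B replaces A's stateful single pass by sentence segmentation followed by per-segment adjacent pairing (alternative decomposition, same cost).

-- ===== PORT A =====
-- PUNC = ('.', '?', '!')
def PUNC : List String := [".", "?", "!"]

-- A's while-loop over the token list, threading the 'last' accumulator
def to_bigrams_loop (last : Option String) (toks : List String) : List (Option String × String) :=
  match toks with
  | [] => []
  | t :: rest =>
    let u := PySem.Str.lower t
    (last, u) :: to_bigrams_loop (if u ∈ PUNC then none else some u) rest

def to_bigrams (s : String) : List (Option String × String) :=
  to_bigrams_loop none (PySem.Str.split₀ (PySem.Str.strip s))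

-- ===== PORT B =====
-- stage 1 of Source B: split the lowered token stream into sentences, cutting after each punctuation token
def seg_loop (sent : List String) (toks : List String) : List (List String) :=
  match toks with
  | [] => if sent.isEmpty then [] else [sent]
  | t :: rest =>
    if t ∈ PUNC then (sent ++ [t]) :: seg_loop [] rest
    else seg_loop (sent ++ [t]) rest

-- stage 2 of Source B: (None, first token) then the adjacent pairs inside one sentence
def sent_pairs (sent : List String) : List (Option String × String) :=
  match sent with
  | [] => []
  | t0 :: rest => (none, t0) :: (List.zip (t0 :: rest) rest).map (fun ab => (some ab.1, ab.2))

def to_bigrams_alt (s : String) : List (Option String × String) :=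
  let toks := (PySem.Str.split₀ (PySem.Str.strip s)).map PySem.Str.lower
  (seg_loop [] toks).flatMap sent_pairs

-- ===== PRECONDITION & SPEC =====
def Spec_to_bigrams (s : String) (out : List (Option String × String)) : Prop := out = to_bigrams_alt s
instance (s : String) (out : List (Option String × String)) : Decidable (Spec_to_bigrams s out) := by unfold Spec_to_bigrams; infer_instance

-- ===== CLAIM (what is proved, stated in full; the proofs are below) =====
def Claim_equal_to_bigrams : Prop := ∀ (s : String), Dom_to_bigrams s → Spec_to_bigrams s (to_bigrams s)

-- ===== LEMMAS AND PROOFS =====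

-- A's loop on the already-lowered token list
def low_loop (last : Option String) (toks : List String) : List (Option String × String) :=
  match toks with
  | [] => []
  | u :: rest => (last, u) :: low_loop (if u ∈ PUNC then none else some u) rest

theorem to_bigrams_loop_eq_low (toks : List String) (last : Option String) :
    to_bigrams_loop last toks = low_loop last (toks.map PySem.Str.lower) := by
  induction toks generalizing last with
  | nil => rfl
  | cons t rest ih => simp [to_bigrams_loop, low_loop, ih]

-- the state A's loop carries after processing a (non-closed) sentence segment
def last_state (sent : List String) : Option String :=
  match sent with
  | [] => none
  | a :: l => some (l.getLastD a)

theorem zip_tail_append (a t : String) (l : List String) :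
    List.zip (a :: (l ++ [t])) (l ++ [t]) = List.zip (a :: l) l ++ [(l.getLastD a, t)] := by
  induction l generalizing a with
  | nil => simp
  | cons b l' ih =>
    simp only [List.cons_append, List.zip_cons_cons, ih b, List.getLastD_cons]

theorem sent_pairs_append (sent : List String) (t : String) :
    sent_pairs (sent ++ [t]) = sent_pairs sent ++ [(last_state sent, t)] := by
  cases sent with
  | nil => simp [sent_pairs, last_state]
  | cons a l =>
    simp only [List.cons_append, sent_pairs, last_state, zip_tail_append, List.map_append]
    simp

theorem last_state_append (sent : List String) (t : String) :
    last_state (sent ++ [t]) = some t := by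
  cases sent with
  | nil => rfl
  | cons a l => simp [last_state]

theorem sent_pairs_nil : sent_pairs [] = [] := rfl

theorem last_state_nil : last_state [] = none := rfl

theorem seg_loop_pairs (toks : List String) (sent : List String) :
    (seg_loop sent toks).flatMap sent_pairs = sent_pairs sent ++ low_loop (last_state sent) toks := by
  induction toks generalizing sent with
  | nil =>
    cases sent with
    | nil => simp [seg_loop, low_loop, sent_pairs]
    | cons a l => simp [seg_loop, low_loop]
  | cons t rest ih =>
    by_cases h : t ∈ PUNC
    · simp [seg_loop, low_loop, h, ih, sent_pairs_append, sent_pairs_nil, last_state_nil]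
    · simp [seg_loop, low_loop, h, ih, sent_pairs_append, last_state_append]

-- ===== VERDICT (by name: the statement is the Claim_ definition above) =====
theorem to_bigrams_spec : Claim_equal_to_bigrams := by
  intro s _
  unfold Spec_to_bigrams to_bigrams to_bigrams_alt
  rw [to_bigrams_loop_eq_low, seg_loop_pairs]
  simp [sent_pairs_nil, last_state_nil]
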